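-- pv_equiv track=rewrite | github.com/hung9104/Chatbot | libs/chatbot_app/chatbot_app/intent/classifier.py | build_answer_map
-- ===== SOURCE A (Python) =====
-- from collections import Counter, defaultdict
--
-- def build_answer_map(intents: list[str], answers: list[str]) -> dict[str, str]:
--     grouped: dict[str, list[str]] = defaultdict(list)
--     for intent, answer in zip(intents, answers):
--         if answer:
--             grouped[intent].append(answer)
--
--     answer_map: dict[str, str] = {}
--     for intent, response_list in grouped.items():
--         answer_map[intent] = Counter(response_list).most_common(1)[0][0]
--     return answer_map
-- ===== SOURCE B (Python) =====
-- def build_answer_map(intents: list[str], answers: list[str]) -> dict[str, str]: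
--     # Brute force over the filtered pair list: no grouping dict, no Counter --
--     # each intent's winner is found by scanning the pair list and counting by scan.
--     pairs = [(i, a) for i, a in zip(intents, answers) if a]
--     answer_map: dict[str, str] = {}
--     for intent, _ in pairs:
--         if intent not in answer_map:
--             group = [a for i, a in pairs if i == intent]
--             answer_map[intent] = max(group, key=group.count)
--     return answer_map
-- ===== Notes on version B (the rewrite author's own statement) =====
-- stated objective: alternative
-- what changed: Replaces A's hash-grouping (defaultdict of per-intent answer lists) plus a Counter.most_common(1) pass per intent with a grouping-free brute-force selection: one filtered pair list, and for each first occurrence of an intent a direct scan of that list rebuilds its answers and max(group, key=group.count) picks the winner by counting-by-scan (Python max keeps the first maximal element, matching most_common's first-seen tie-break).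
import Mathlib
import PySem

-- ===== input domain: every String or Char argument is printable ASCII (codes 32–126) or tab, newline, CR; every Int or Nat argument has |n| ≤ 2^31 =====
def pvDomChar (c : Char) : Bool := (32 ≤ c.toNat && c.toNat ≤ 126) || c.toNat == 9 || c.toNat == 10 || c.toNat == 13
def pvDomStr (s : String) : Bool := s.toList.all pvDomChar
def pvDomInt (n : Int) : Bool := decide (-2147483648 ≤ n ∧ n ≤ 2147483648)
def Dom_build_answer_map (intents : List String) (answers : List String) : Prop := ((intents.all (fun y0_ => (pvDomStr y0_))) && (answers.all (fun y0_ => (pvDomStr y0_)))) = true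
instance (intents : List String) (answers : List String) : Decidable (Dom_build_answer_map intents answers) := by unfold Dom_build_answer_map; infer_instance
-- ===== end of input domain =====

-- B replaces A's hash-grouping (defaultdict of per-intent lists) + Counter.most_common
-- with a grouping-free brute-force selection over the filtered pair list, counting by scan
-- (objective: alternative; B is not claimed faster).


-- ===== PORT A =====
-- Counter(xs).most_common(1)[0][0]: items sorted by count descending (stable), first one.
-- A only applies the [0] index to non-empty groups, so pyGetD's default ("", 0) is never used.
def pyMostCommon1 (xs : List String) : String :=
  (PySem.List.pyGetD
    (PySem.List.sorted (PySem.Dict.counter xs).items (fun p => p.2) true)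
    0 ("", 0)).1

def build_answer_map (intents : List String) (answers : List String) : List (String × String) :=
  -- grouped = defaultdict(list); for intent, answer in zip(...): if answer: grouped[intent].append(answer)
  let grouped : PySem.Dict String (List String) :=
    (intents.zip answers).foldl
      (fun d p => if p.2 ≠ "" then d.modify p.1 [] (· ++ [p.2]) else d)
      ⟨[]⟩
  -- answer_map[intent] = Counter(response_list).most_common(1)[0][0]
  (grouped.items.foldl
    (fun m p => m.insert p.1 (pyMostCommon1 p.2))
    (⟨[]⟩ : PySem.Dict String String)).items

-- ===== PORT B =====
-- pairs = [(i, a) for i, a in zip(intents, answers) if a]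
-- for intent, _ in pairs: if intent not in answer_map:
--   group = [a for i, a in pairs if i == intent]; answer_map[intent] = max(group, key=group.count)
-- max is only applied to a non-empty group (it contains this pair's own answer), so maxD's
-- default "" is never used.
def build_answer_map_alt (intents : List String) (answers : List String) : List (String × String) :=
  let pairs := (intents.zip answers).filter (fun p => decide (p.2 ≠ ""))
  (pairs.foldl
    (fun m p =>
      if m.contains p.1 then m
      else
        let group := (pairs.filter (fun q => q.1 == p.1)).map (fun q => q.2)
        m.insert p.1 (PySem.List.maxD group (fun a => (group.count a : Int)) ""))
    (⟨[]⟩ : PySem.Dict String String)).items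

-- ===== PRECONDITION & SPEC =====
def Spec_build_answer_map (intents : List String) (answers : List String) (out : List (String × String)) : Prop := out = build_answer_map_alt intents answers
instance (intents : List String) (answers : List String) (out : List (String × String)) : Decidable (Spec_build_answer_map intents answers out) := by unfold Spec_build_answer_map; infer_instance

-- ===== CLAIM (what is proved, stated in full; the proofs are below) =====
def Claim_equal_build_answer_map : Prop := ∀ (intents : List String) (answers : List String), Dom_build_answer_map intents answers → Spec_build_answer_map intents answers (build_answer_map intents answers)

-- ===== LEMMAS AND PROOFS =====

-- the per-intent group of answers, read off the filtered pair list
def pvGroup (pairs : List (String × String)) (k : String) : List String :=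
  (pairs.filter (fun q => q.1 == k)).map (fun q => q.2)

-- the first-maximum step of Python's max(…, key=f) (= PySem.List.max?'s fold step)
def kstep (f : String → Int) (acc : Option String) (x : String) : Option String :=
  match acc with
  | none => some x
  | some m => if f m < f x then some x else some m

-- the same step on (value, count) pairs, as it appears at the head of the stable sort
def pstep (best : Option (String × Int)) (item : String × Int) : Option (String × Int) :=
  match best with
  | none => some item
  | some b => if b.2 < item.2 then some item else some b

-- set update distributes over an already-present prefix (the seen-set decomposition)
theorem update_append_decomp (t : List String) (s₂ s₁ : List String) :
    PySem.Set.update (s₁ ++ s₂) t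
      = s₁ ++ PySem.Set.update s₂ (t.filter (fun y => !(s₁.contains y))) := by
  induction t generalizing s₂ with
  | nil => rfl
  | cons y t ih =>
    show PySem.Set.update (PySem.Set.add (s₁ ++ s₂) y) t = _
    by_cases h1 : y ∈ s₁
    · have hadd : PySem.Set.add (s₁ ++ s₂) y = s₁ ++ s₂ := by
        simp [PySem.Set.add, PySem.Set.contains, h1]
      rw [hadd, List.filter_cons_of_neg (by simp [h1])]
      exact ih s₂
    · have hadd : PySem.Set.add (s₁ ++ s₂) y = s₁ ++ PySem.Set.add s₂ y := by
        by_cases h2 : y ∈ s₂ <;>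
          simp [PySem.Set.add, PySem.Set.contains, h1, h2, List.append_assoc]
      rw [hadd, List.filter_cons_of_pos (by simp [h1])]
      exact ih (PySem.Set.add s₂ y)

theorem update_decomp (t s : List String) :
    PySem.Set.update s t
      = s ++ PySem.Set.ofList (t.filter (fun y => !(s.contains y))) := by
  simpa using update_append_decomp t [] s

theorem ofList_cons (y : String) (r : List String) :
    PySem.Set.ofList (y :: r)
      = y :: PySem.Set.ofList (r.filter (fun z => !(z == y))) := by
  show PySem.Set.update (PySem.Set.add [] y) r = _
  rw [show PySem.Set.add [] y = [y] from rfl, update_decomp r [y], List.singleton_append]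
  congr 2
  apply List.filter_congr
  intro z _
  by_cases hz : z = y <;> simp [hz]

-- the fresh-head unfolding of an ordered dedup filtered by a seen-test c
theorem ofList_filter_cons (c : String → Bool) (y : String) (t : List String)
    (h : c y = false) :
    PySem.Set.ofList ((y :: t).filter (fun z => !(c z)))
      = y :: PySem.Set.ofList (t.filter (fun z => !(z == y || c z))) := by
  rw [List.filter_cons_of_pos (by simp [h]), ofList_cons]
  congr 2
  rw [List.filter_filter]
  apply List.filter_congr
  intro z _
  cases hz : z == y <;> cases hc : c z <;> simp_all

-- B's guarded insertion loop appends exactly the unseen intents, in first-occurrence order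
theorem bfold_items (w : String → String) (l : List (String × String)) :
    ∀ (m : PySem.Dict String String),
    (l.foldl (fun m p => if m.contains p.1 then m else m.insert p.1 (w p.1)) m).items
      = m.items
        ++ (PySem.Set.ofList ((l.map (fun p => p.1)).filter (fun k => !(m.contains k)))).map
            (fun k => (k, w k)) := by
  induction l with
  | nil => intro m; simp
  | cons p l ih =>
    intro m
    simp only [List.foldl_cons, List.map_cons]
    by_cases h1 : m.contains p.1 = true
    · rw [if_pos h1, List.filter_cons_of_neg (by simp [h1])]
      exact ih m
    · have h1' : m.contains p.1 = false := by simpa using h1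
      have hfc : (l.map (fun p => p.1)).filter
            (fun k => !((m.insert p.1 (w p.1)).contains k))
          = (l.map (fun p => p.1)).filter (fun k => !(k == p.1 || m.contains k)) := by
        apply List.filter_congr
        intro z _
        rw [PySem.Dict.contains_insert]
      rw [if_neg (by simp [h1']), ih (m.insert p.1 (w p.1)), hfc,
        PySem.Dict.items_insert_of_not_contains m _ h1',
        ofList_filter_cons (fun k => m.contains k) p.1 _ h1']
      simp

-- first-max over a list = first-max over its ordered dedup (duplicates never win)
theorem kfold_dedup (f : String → Int) (t : List String) :
    ∀ (s : List String) (o : Option String),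
      (∀ y ∈ s, ∃ m, o = some m ∧ f y ≤ f m) →
      t.foldl (kstep f) o
        = (PySem.Set.ofList (t.filter (fun z => !(decide (z ∈ s))))).foldl (kstep f) o := by
  induction t with
  | nil => intro s o _; rfl
  | cons y t ih =>
    intro s o hinv
    by_cases hy : y ∈ s
    · obtain ⟨m, ho, hle⟩ := hinv y hy
      have hstep : kstep f o y = o := by
        subst ho; simp [kstep, not_lt.mpr hle]
      rw [List.foldl_cons, hstep, List.filter_cons_of_neg (by simp [hy])]
      exact ih s o hinv
    · have hfc : t.filter (fun z => !(z == y || decide (z ∈ s)))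
          = t.filter (fun z => !(decide (z ∈ s ++ [y]))) := by
        apply List.filter_congr
        intro z _
        by_cases hz : z = y <;> by_cases hs : z ∈ s <;> simp [hz, hs]
      rw [List.foldl_cons,
        ofList_filter_cons (fun z => decide (z ∈ s)) y t (by simp [hy]), hfc,
        List.foldl_cons]
      apply ih (s ++ [y])
      intro z hz
      rcases List.mem_append.mp hz with hzs | hzy
      · obtain ⟨m, ho, hle⟩ := hinv z hzs
        subst ho
        simp only [kstep]
        by_cases hlt : f m < f y
        · exact ⟨y, by simp [hlt], le_of_lt (lt_of_le_of_lt hle hlt)⟩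
        · exact ⟨m, by simp [hlt], hle⟩
      · have hzy' : z = y := by simpa using hzy
        subst hzy'
        cases o with
        | none => exact ⟨z, rfl, le_refl _⟩
        | some m =>
          simp only [kstep]
          by_cases hlt : f m < f z
          · exact ⟨z, by simp [hlt], le_refl _⟩
          · exact ⟨m, by simp [hlt], not_lt.mp hlt⟩

theorem max?_eq_kstep (f : String → Int) (xs : List String) :
    PySem.List.max? xs f = xs.foldl (kstep f) none := by
  unfold PySem.List.max?
  congr 1
  funext acc x
  cases acc <;> rfl

theorem max?_dedup (f : String → Int) (l : List String) :
    PySem.List.max? l f = PySem.List.max? (PySem.Set.ofList l) f := by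
  have h := kfold_dedup f l [] none (by intro y hy; cases hy)
  have h2 : l.filter (fun z => !(decide (z ∈ ([] : List String)))) = l := by simp
  rw [h2] at h
  rw [max?_eq_kstep, max?_eq_kstep]
  exact h

-- folding the pair step over (k, f k) pairs is folding the key step over the keys
theorem pairFold (f : String → Int) (ks : List String) :
    ∀ (o : Option String),
      (ks.map (fun k => (k, f k))).foldl pstep (o.map (fun m => (m, f m)))
        = (ks.foldl (kstep f) o).map (fun m => (m, f m)) := by
  induction ks with
  | nil => intro o; rfl
  | cons k ks ih =>
    intro o
    rw [List.map_cons, List.foldl_cons, List.foldl_cons]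
    cases o with
    | none => exact ih (some k)
    | some m =>
      show (ks.map _).foldl pstep (pstep (some (m, f m)) (k, f k)) = _
      simp only [pstep, kstep]
      by_cases h : f m < f k
      · rw [if_pos h, if_pos h]; exact ih (some k)
      · rw [if_neg h, if_neg h]; exact ih (some m)

-- head of the descending stable insertion sort, one insertion at a time
theorem head?_insertBy (x : String × Int) (l : List (String × Int)) :
    (PySem.List.insertBy (fun a b => decide (b.2 < a.2)) x l).head?
      = some (match l.head? with
              | none => x
              | some y => if y.2 < x.2 then x else y) := by
  cases l with
  | nil => rfl
  | cons y ys =>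
    by_cases h : y.2 < x.2 <;> simp [PySem.List.insertBy, h]

-- the descending stable sort starts with the FIRST item of maximal count
theorem head?_sorted_rev (ps : List (String × Int)) (acc : List (String × Int)) :
    (ps.foldl (fun acc x => PySem.List.insertBy (fun a b => decide (b.2 < a.2)) x acc) acc).head?
      = ps.foldl pstep acc.head? := by
  induction ps generalizing acc with
  | nil => rfl
  | cons x xs ih =>
    simp only [List.foldl_cons]
    rw [ih, head?_insertBy]
    cases acc.head? with
    | none => rfl
    | some v => by_cases h : v.2 < x.2 <;> simp [pstep, h]

-- A's most_common(1)[0][0] IS B's max(group, key=group.count)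
theorem winner_eq (l : List String) :
    pyMostCommon1 l = PySem.List.maxD l (fun a => (l.count a : Int)) "" := by
  unfold pyMostCommon1
  rw [PySem.List.pyGetD_zero, PySem.List.sorted_rev_eq_foldl_insertBy]
  have h := head?_sorted_rev (PySem.Dict.counter l).items []
  simp only [List.head?_nil] at h
  rw [List.getD_eq_getElem?_getD, ← List.head?_eq_getElem?, h,
    PySem.Dict.items_counter]
  have hp := pairFold (fun a => (l.count a : Int)) (PySem.Set.ofList l) none
  simp only [Option.map_none] at hp
  rw [hp]
  have hmd : (PySem.Set.ofList l).foldl (kstep (fun a => (l.count a : Int))) none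
      = PySem.List.max? l (fun a => (l.count a : Int)) := by
    rw [max?_dedup, max?_eq_kstep]
  rw [hmd]
  unfold PySem.List.maxD
  cases hm : PySem.List.max? l (fun a => (l.count a : Int)) with
  | none => rfl
  | some m => rfl

-- ===== VERDICT (by name: the statement is the Claim_ definition above) =====
theorem build_answer_map_spec : Claim_equal_build_answer_map := by
  intro intents answers _
  unfold Spec_build_answer_map build_answer_map build_answer_map_alt
  dsimp only
  have hite := PySem.List.foldl_ite_eq_foldl_filter
    (p := fun p : String × String => p.2 ≠ "")
    (f := fun (d : PySem.Dict String (List String)) p => d.modify p.1 [] (· ++ [p.2]))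
    (intents.zip answers) ⟨[]⟩
  rw [hite]
  set pairs := (intents.zip answers).filter (fun p => decide (p.2 ≠ "")) with hpairs
  set grouped := pairs.foldl (fun d p => d.modify p.1 [] (· ++ [p.2]))
    (⟨[]⟩ : PySem.Dict String (List String)) with hgrouped
  -- A's grouped dict, characterised
  have hkeys : grouped.keys = PySem.Set.ofList (pairs.map (fun p => p.1)) := by
    rw [hgrouped]
    exact PySem.Dict.keys_foldl_modify_key pairs (fun p => p.1) []
      (fun _ p => fun v => v ++ [p.2]) ⟨[]⟩
  have hnodup : grouped.keys.Nodup := by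
    rw [hgrouped]
    exact PySem.Dict.nodup_keys_foldl_modify_key pairs (fun p => p.1) []
      (fun _ p => fun v => v ++ [p.2]) ⟨[]⟩ List.nodup_nil
  have hgetD : ∀ k, grouped.getD k [] = pvGroup pairs k := by
    intro k
    rw [hgrouped]
    simpa [pvGroup] using PySem.Dict.getD_foldl_modify_append pairs ⟨[]⟩ k
  have hitems : grouped.items = grouped.keys.map (fun k => (k, grouped.getD k [])) :=
    PySem.Dict.items_eq_map_keys grouped hnodup []
  -- A's second loop inserts fresh distinct keys, so it appends
  rw [PySem.Dict.items_foldl_insert_fresh grouped.items (fun p => p.1)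
      (fun p => pyMostCommon1 p.2) ⟨[]⟩ (fun a _ => rfl) hnodup]
  -- B's loop, via bfold_items with the per-intent winner function
  rw [bfold_items (fun k => PySem.List.maxD
        ((pairs.filter (fun q => q.1 == k)).map (fun q => q.2))
        (fun a => ((((pairs.filter (fun q => q.1 == k)).map (fun q => q.2)).count a : Nat) : Int))
        "") pairs ⟨[]⟩]
  have hfilter : (pairs.map (fun p => p.1)).filter
        (fun k => !((⟨[]⟩ : PySem.Dict String String).contains k))
      = pairs.map (fun p => p.1) := by
    simp
  rw [hfilter, hitems, ← hkeys, List.map_map, List.nil_append, List.nil_append]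
  apply List.map_congr_left
  intro k _
  simp only [Function.comp]
  rw [hgetD k, winner_eq]
  rfl
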